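-- pv_equiv track=rewrite | github.com/Adamssss/projectEuler | pb164.py | tdset
-- ===== SOURCE A (Python) =====
-- def tdset(d):
--     temp = [0]*1000
--     if d == 1:
--         for i in range(1,10):
--             temp[i] += 1
--         return temp
--     if d == 2:
--         for i in range(1,10):
--             for j in range(10):
--                 if i+j <= 9:
--                     temp[i*10+j] += 1
--         return temp
--     if d == 3:
--         for i in range(1,10):
--             for j in range(10):
--                 for k in range(10):
--                     if i+j+k <= 9:
--                         temp[i*100+j*10+k] += 1
--         return temp
--     lset = tdset(d-1)
--     for i in range(1000):
--         if lset[i] > 0: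
--             r = i%100
--             s = r%10+r//10
--             for j in range(10):
--                 if s+j <= 9:
--                     temp[r*10+j] += lset[i]
--     return temp
-- ===== SOURCE B (Python) =====
-- def _ds(i):
--     # digit sum of the three-digit state i (0 <= i < 1000)
--     return i // 100 + i // 10 % 10 + i % 10
--
--
-- def tdset(d):
--     if d == 1:
--         return [1 if 1 <= i <= 9 else 0 for i in range(1000)]
--     if d == 2:
--         return [1 if 10 <= i <= 99 and i // 10 + i % 10 <= 9 else 0 for i in range(1000)]
--     if d == 3:
--         return [1 if 100 <= i and _ds(i) <= 9 else 0 for i in range(1000)]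
--     # 100-state DP on the last two digits: g[10*b + c] = number of admissible
--     # d'-digit strings whose last two digits are (b, c).
--     t3 = [1 if 100 <= i and _ds(i) <= 9 else 0 for i in range(1000)]
--     g = [sum(t3[100 * a + k] for a in range(10)) for k in range(100)]
--     for _ in range(d - 4):
--         g = [sum(g[10 * b + k // 10] for b in range(10) if b + k // 10 + k % 10 <= 9)
--              for k in range(100)]
--     return [g[i // 10] if _ds(i) <= 9 else 0 for i in range(1000)]
-- ===== Notes on version B (the rewrite author's own statement) =====
-- stated objective: faster
-- what changed: Replaces A's recursion that carries a full 1000-entry array per digit level and scatter-accumulates temp[r*10+j] += lset[i] by an iterative DP over a 100-entry state indexed by the last two digits, updated by gather comprehensions and expanded to the 1000-array only once at the end; the d=1,2,3 base arrays become closed-form comprehensions.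
-- outside the precondition, e.g. on tdset(0): A raises RecursionError
import Mathlib
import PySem

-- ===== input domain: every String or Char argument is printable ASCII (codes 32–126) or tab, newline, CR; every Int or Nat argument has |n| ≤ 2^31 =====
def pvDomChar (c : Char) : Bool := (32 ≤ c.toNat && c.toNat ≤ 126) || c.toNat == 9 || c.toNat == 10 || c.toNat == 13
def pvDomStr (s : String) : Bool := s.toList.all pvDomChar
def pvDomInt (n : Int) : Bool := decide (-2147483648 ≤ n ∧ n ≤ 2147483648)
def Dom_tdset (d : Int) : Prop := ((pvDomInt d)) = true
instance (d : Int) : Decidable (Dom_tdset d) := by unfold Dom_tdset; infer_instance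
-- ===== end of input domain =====

-- B replaces A's recursion over full 1000-entry scatter arrays by an iterative 100-state
-- last-two-digit DP with gather sums (objective: faster by a constant factor).


-- ===== PORT A =====
-- temp[i] += v  (every use has 0 ≤ i < len temp, where pyGetD/pySetD are exact)
def pyAddAt (t : List Int) (i : Int) (v : Int) : List Int :=
  PySem.List.pySetD t i (PySem.List.pyGetD t i 0 + v)

def tdBase1 : List Int :=
  (PySem.List.pyRange 1 10 1).foldl (fun t i => pyAddAt t i 1) (List.replicate 1000 0)

def tdBase2 : List Int :=
  (PySem.List.pyRange 1 10 1).foldl (fun t i =>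
    (PySem.List.pyRange 0 10 1).foldl (fun t j =>
      if i + j ≤ 9 then pyAddAt t (i * 10 + j) 1 else t) t) (List.replicate 1000 0)

def tdBase3 : List Int :=
  (PySem.List.pyRange 1 10 1).foldl (fun t i =>
    (PySem.List.pyRange 0 10 1).foldl (fun t j =>
      (PySem.List.pyRange 0 10 1).foldl (fun t k =>
        if i + j + k ≤ 9 then pyAddAt t (i * 100 + j * 10 + k) 1 else t) t) t)
    (List.replicate 1000 0)

-- the body of A's final loop over the previous level's array
def tdStep (lset : List Int) : List Int :=
  (PySem.List.pyRange 0 1000 1).foldl (fun t i =>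
    if 0 < PySem.List.pyGetD lset i 0 then
      let r := PySem.Int.mod i 100
      let s := PySem.Int.mod r 10 + PySem.Int.floordiv r 10
      (PySem.List.pyRange 0 10 1).foldl (fun t j =>
        if s + j ≤ 9 then pyAddAt t (r * 10 + j) (PySem.List.pyGetD lset i 0) else t) t
    else t) (List.replicate 1000 0)

def tdset (d : Int) : List Int :=
  if d = 1 then tdBase1
  else if d = 2 then tdBase2
  else if d = 3 then tdBase3
  else if d ≤ 3 then List.replicate 1000 0  -- unreachable under Pre_: Python recurses forever here
  else tdStep (tdset (d - 1))
termination_by (d - 3).toNat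
decreasing_by simp_all

-- ===== PORT B =====
-- digit sum of the three-digit state i (helper _ds of Source B)
def altDS (i : Int) : Int :=
  PySem.Int.floordiv i 100 + PySem.Int.mod (PySem.Int.floordiv i 10) 10 + PySem.Int.mod i 10

def altBase1 : List Int :=
  (PySem.List.pyRange 0 1000 1).map (fun i => if 1 ≤ i ∧ i ≤ 9 then 1 else 0)

def altBase2 : List Int :=
  (PySem.List.pyRange 0 1000 1).map (fun i =>
    if 10 ≤ i ∧ i ≤ 99 ∧ PySem.Int.floordiv i 10 + PySem.Int.mod i 10 ≤ 9 then 1 else 0)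

def altBase3 : List Int :=
  (PySem.List.pyRange 0 1000 1).map (fun i => if 100 ≤ i ∧ altDS i ≤ 9 then 1 else 0)

def altInit : List Int :=
  (PySem.List.pyRange 0 100 1).map (fun k =>
    ((PySem.List.pyRange 0 10 1).map (fun a => PySem.List.pyGetD altBase3 (100 * a + k) 0)).sum)

def altT (g : List Int) : List Int :=
  (PySem.List.pyRange 0 100 1).map (fun k =>
    (((PySem.List.pyRange 0 10 1).filter (fun b =>
        decide (b + PySem.Int.floordiv k 10 + PySem.Int.mod k 10 ≤ 9))).map (fun b =>
      PySem.List.pyGetD g (10 * b + PySem.Int.floordiv k 10) 0)).sum)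

def altExpand (g : List Int) : List Int :=
  (PySem.List.pyRange 0 1000 1).map (fun i =>
    if altDS i ≤ 9 then PySem.List.pyGetD g (PySem.Int.floordiv i 10) 0 else 0)

def tdset_alt (d : Int) : List Int :=
  if d = 1 then altBase1
  else if d = 2 then altBase2
  else if d = 3 then altBase3
  else altExpand ((PySem.List.pyRange 0 (d - 4) 1).foldl (fun g _ => altT g) altInit)

-- ===== PRECONDITION & SPEC =====
-- Pre_ excludes d ≤ 0, where Python A recurses forever, and d > 900, where A's recursion
-- depth can exceed CPython's default recursion limit and raise RecursionError (the
-- conservative bound 900 stays safely below it; A still returns for some d slightly above).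
def Pre_tdset (d : Int) : Prop := 1 ≤ d ∧ d ≤ 900
instance (d : Int) : Decidable (Pre_tdset d) := by unfold Pre_tdset; infer_instance
def pvWitness_tdset : Int := (5)

def Spec_tdset (d : Int) (out : List Int) : Prop := out = tdset_alt d
instance (d : Int) (out : List Int) : Decidable (Spec_tdset d out) := by unfold Spec_tdset; infer_instance

-- ===== CLAIM (what is proved, stated in full; the proofs are below) =====
def Claim_equal_tdset : Prop := ∀ (d : Int), Dom_tdset d → Pre_tdset d → Spec_tdset d (tdset d)


-- ===== LEMMAS AND PROOFS =====

-- digit sum of a state m < 1000, in Nat form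
def dsN (m : Nat) : Int := ((m / 100 + m / 10 % 10 + m % 10 : Nat) : Int)

theorem altDS_natCast (m : Nat) : altDS (m : Int) = dsN m := by
  simp [altDS, dsN]

-- A's per-cell accumulation temp[i] += v, read pointwise
theorem length_pyAddAt (t : List Int) (i v : Int) : (pyAddAt t i v).length = t.length := by
  simp [pyAddAt, PySem.List.length_pySetD]

theorem getD_pyAddAt (t : List Int) (i v : Int) (m : Nat) (hi : 0 ≤ i) (hi' : i < t.length) :
    (pyAddAt t i v).getD m 0 = if (m : Int) = i then t.getD m 0 + v else t.getD m 0 := by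
  rw [pyAddAt, PySem.List.pySetD_of_nonneg _ _ hi,
    PySem.List.pyGetD_eq_getElem _ _ hi (by simpa using hi')]
  rw [List.getD_eq_getElem?_getD, List.getD_eq_getElem?_getD, List.getElem?_set]
  have hge : t.getD (i.toNat) 0 = (t[i.toNat]?).getD 0 := List.getD_eq_getElem?_getD
  split_ifs with h1 h2 h3 <;>
    simp_all [List.getD_eq_getElem?_getD] <;> omega

theorem length_foldl_pres {alpha : Type} (f : List Int → alpha → List Int)
    (h : ∀ t a, (f t a).length = t.length) :
    ∀ (l : List alpha) (t : List Int), (l.foldl f t).length = t.length := by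
  intro l
  induction l with
  | nil => intro t; rfl
  | cons x xs ih => intro t; rw [List.foldl_cons, ih, h]

-- the inner 'for j in range(10)' loop of A's step, read pointwise
theorem inner_getD (r s v : Int) (hr0 : 0 ≤ r) (hr : r < 100) :
    ∀ (n : Nat) (a : Int), a + n = 10 → 0 ≤ a →
    ∀ (t : List Int), t.length = 1000 → ∀ (m : Nat), m < 1000 →
    ((PySem.List.pyRange a 10 1).foldl
        (fun t j => if s + j ≤ 9 then pyAddAt t (r * 10 + j) v else t) t).getD m 0
      = t.getD m 0 +
        if ((m / 10 : Nat) : Int) = r ∧ a ≤ ((m % 10 : Nat) : Int) ∧ s + ((m % 10 : Nat) : Int) ≤ 9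
        then v else 0 := by
  intro n
  induction n with
  | zero =>
    intro a ha ha0 t ht m hm
    rw [PySem.List.pyRange_one_eq_nil (by omega), List.foldl_nil, if_neg (by omega)]
    omega
  | succ n ih =>
    intro a ha ha0 t ht m hm
    rw [PySem.List.pyRange_one_cons (by omega), List.foldl_cons]
    have ht1 : (if s + a ≤ 9 then pyAddAt t (r * 10 + a) v else t).length = 1000 := by
      split <;> simp [length_pyAddAt, ht]
    rw [ih (a + 1) (by omega) (by omega) _ ht1 m hm]
    by_cases hc : s + a ≤ 9
    · rw [if_pos hc] at *
      rw [getD_pyAddAt t (r * 10 + a) v m (by omega) (by rw [ht]; push_cast; omega)]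
      split_ifs <;> omega
    · rw [if_neg hc]
      split_ifs <;> omega

-- contribution of source cell i to target cell m in one step of A
def contrib (lset : List Int) (m : Nat) (i : Int) : Int :=
  if 0 < PySem.List.pyGetD lset i 0
     ∧ ((m / 10 : Nat) : Int) = PySem.Int.mod i 100
     ∧ PySem.Int.mod (PySem.Int.mod i 100) 10 + PySem.Int.floordiv (PySem.Int.mod i 100) 10
         + ((m % 10 : Nat) : Int) ≤ 9
  then PySem.List.pyGetD lset i 0 else 0

theorem outer_getD (lset : List Int) :
    ∀ (I : List Int) (t : List Int), t.length = 1000 → ∀ (m : Nat), m < 1000 →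
    ((I.foldl (fun t i =>
        if 0 < PySem.List.pyGetD lset i 0 then
          let r := PySem.Int.mod i 100
          let s := PySem.Int.mod r 10 + PySem.Int.floordiv r 10
          (PySem.List.pyRange 0 10 1).foldl
            (fun t j => if s + j ≤ 9 then pyAddAt t (r * 10 + j) (PySem.List.pyGetD lset i 0) else t) t
        else t) t).getD m 0)
      = t.getD m 0 + (I.map (contrib lset m)).sum := by
  intro I
  induction I with
  | nil => intro t ht m hm; simp
  | cons i I ih =>
    intro t ht m hm
    rw [List.foldl_cons, List.map_cons, List.sum_cons]
    by_cases hp : 0 < PySem.List.pyGetD lset i 0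
    · simp only [if_pos hp]
      have hr0 : 0 ≤ PySem.Int.mod i 100 := PySem.Int.mod_nonneg i (by norm_num)
      have hr : PySem.Int.mod i 100 < 100 := PySem.Int.mod_lt i (by norm_num)
      have ht1 : ((PySem.List.pyRange 0 10 1).foldl
          (fun t j => if PySem.Int.mod (PySem.Int.mod i 100) 10 + PySem.Int.floordiv (PySem.Int.mod i 100) 10 + j ≤ 9
            then pyAddAt t (PySem.Int.mod i 100 * 10 + j) (PySem.List.pyGetD lset i 0) else t) t).length = 1000 := by
        rw [length_foldl_pres]
        · exact ht
        · intro t j; split <;> simp [length_pyAddAt]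
      rw [ih _ ht1 m hm,
        inner_getD (PySem.Int.mod i 100) _ _ hr0 hr 10 0 (by norm_num) (by norm_num) t ht m hm]
      rw [contrib]
      split_ifs <;> omega
    · simp only [if_neg hp]
      rw [ih _ ht m hm, contrib, if_neg (fun h => hp h.1)]
      ring

theorem length_tdStep (lset : List Int) : (tdStep lset).length = 1000 := by
  rw [tdStep, length_foldl_pres]
  · exact List.length_replicate
  · intro t i
    split
    · rw [length_foldl_pres]
      intro t j; split <;> simp [length_pyAddAt]
    · rfl

theorem tdStep_getD (lset : List Int) (m : Nat) (hm : m < 1000) :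
    (tdStep lset).getD m 0 = ((PySem.List.pyRange 0 1000 1).map (contrib lset m)).sum := by
  rw [tdStep, outer_getD lset _ _ List.length_replicate m hm]
  have h0 : (List.replicate 1000 (0 : Int)).getD m 0 = 0 := List.getD_replicate _ hm
  rw [h0, zero_add]

-- splitting the sum over range(1000) into ten blocks of 100
theorem sum_blocks (f : Int → Int) : ∀ (n : Nat),
    ((PySem.List.pyRange 0 (100 * (n : Int)) 1).map f).sum
      = ((PySem.List.pyRange 0 (n : Int) 1).map
          (fun a => ((PySem.List.pyRange (100 * a) (100 * a + 100) 1).map f).sum)).sum := by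
  intro n
  induction n with
  | zero =>
    rw [show ((0 : Nat) : Int) = 0 by norm_num, show (100 : Int) * 0 = 0 by norm_num,
      PySem.List.pyRange_one_eq_nil le_rfl]
    simp
  | succ n ih =>
    have h1 : (100 * ((n + 1 : Nat) : Int)) = 100 * (n : Int) + 100 := by push_cast; ring
    have h2 : ((n + 1 : Nat) : Int) = (n : Int) + 1 := by push_cast; ring
    rw [h1, h2, PySem.List.pyRange_one_append 0 (100 * (n : Int)) (100 * (n : Int) + 100) (by positivity) (by omega),
      PySem.List.pyRange_one_succ_right (by positivity)]
    rw [List.map_append, List.sum_append, ih, List.map_append, List.sum_append]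
    simp

theorem sum_single (f : Int → Int) : ∀ (n : Nat) (lo x : Int), lo ≤ x → x < lo + n →
    (∀ i, lo ≤ i → i < lo + n → i ≠ x → f i = 0) →
    ((PySem.List.pyRange lo (lo + (n : Int)) 1).map f).sum = f x := by
  intro n
  induction n with
  | zero => intro lo x h1 h2; omega
  | succ n ih =>
    intro lo x h1 h2 h0
    rw [PySem.List.pyRange_one_cons (by push_cast; omega), List.map_cons, List.sum_cons]
    by_cases hx : x = lo
    · subst hx
      have : ((PySem.List.pyRange (x + 1) (x + (↑(n + 1) : Int)) 1).map f).sum = 0 := by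
        apply List.sum_eq_zero
        intro y hy
        rcases List.mem_map.mp hy with ⟨i, hi, rfl⟩
        rcases (PySem.List.mem_pyRange_one).mp hi with ⟨hi1, hi2⟩
        exact h0 i (by omega) (by push_cast at hi2 ⊢; omega) (by omega)
      rw [this]; ring
    · have : f lo = 0 := h0 lo le_rfl (by push_cast; omega) (fun h => hx h.symm)
      rw [this]
      have harg : lo + (↑(n + 1) : Int) = (lo + 1) + (n : Int) := by push_cast; ring
      rw [harg, ih (lo + 1) x (by omega) (by omega)
        (fun i a b c => h0 i (by omega) (by push_cast at b ⊢; omega) c)]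
      ring


-- nonneg read, any index
theorem pyGetD_nonneg_total (l : List Int) (i : Int) (hnn : ∀ x ∈ l, 0 ≤ x) :
    0 ≤ PySem.List.pyGetD l i 0 := by
  by_cases hr : PySem.Raise.InRange l.length i
  · exact hnn _ (PySem.List.pyGetD_mem l 0 hr)
  · rw [PySem.List.pyGetD_of_none _ _ _ (Iff.mpr (PySem.List.pyGet?_eq_none_iff l i) hr)]

theorem contrib_eq_zero (lset : List Int) (m : Nat) (a i : Int) (hm : m < 1000)
    (h1 : 100 * a ≤ i) (h2 : i < 100 * a + 100) (hne : i ≠ 100 * a + ((m / 10 : Nat) : Int)) :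
    contrib lset m i = 0 := by
  rw [contrib, if_neg]
  intro h
  have := h.2.1
  rw [PySem.Int.mod_eq_emod_of_pos (by norm_num)] at this
  omega

theorem contrib_at_hit (lset : List Int) (m : Nat) (a : Int) (hm : m < 1000)
    (hnn : 0 ≤ PySem.List.pyGetD lset (100 * a + ((m / 10 : Nat) : Int)) 0) :
    contrib lset m (100 * a + ((m / 10 : Nat) : Int)) =
      if dsN m ≤ 9 then PySem.List.pyGetD lset (100 * a + ((m / 10 : Nat) : Int)) 0 else 0 := by
  rw [contrib]
  have e1 : PySem.Int.mod (100 * a + ((m / 10 : Nat) : Int)) 100 = ((m / 10 : Nat) : Int) := by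
    rw [PySem.Int.mod_eq_emod_of_pos (by norm_num)]; omega
  have e2 : PySem.Int.mod ((m / 10 : Nat) : Int) 10 = ((m / 10 % 10 : Nat) : Int) := by
    exact_mod_cast PySem.Int.mod_natCast (m / 10) 10
  have e3 : PySem.Int.floordiv ((m / 10 : Nat) : Int) 10 = ((m / 10 / 10 : Nat) : Int) := by
    exact_mod_cast PySem.Int.floordiv_natCast (m / 10) 10
  rw [e1, e2, e3, dsN]
  split_ifs <;> omega

set_option maxHeartbeats 1000000 in
theorem tdStep_master (lset : List Int) (hnn : ∀ x ∈ lset, 0 ≤ x)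
    (m : Nat) (hm : m < 1000) :
    (tdStep lset).getD m 0 =
      if dsN m ≤ 9 then
        ((PySem.List.pyRange 0 10 1).map
          (fun a => PySem.List.pyGetD lset (100 * a + ((m / 10 : Nat) : Int)) 0)).sum
      else 0 := by
  rw [tdStep_getD lset m hm, show (1000 : Int) = 100 * ((10 : Nat) : Int) by norm_num,
    sum_blocks (contrib lset m) 10]
  have hblock : ∀ a ∈ PySem.List.pyRange 0 ((10 : Nat) : Int) 1,
      ((PySem.List.pyRange (100 * a) (100 * a + 100) 1).map (contrib lset m)).sum
        = contrib lset m (100 * a + ((m / 10 : Nat) : Int)) := by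
    intro a ha
    rcases PySem.List.mem_pyRange_one.mp ha with ⟨ha0, ha1⟩
    rw [show (100 * a + 100 : Int) = 100 * a + ((100 : Nat) : Int) by norm_num]
    exact sum_single (contrib lset m) 100 (100 * a) (100 * a + ((m / 10 : Nat) : Int))
      (by omega) (by push_cast; omega)
      (fun i h1 h2 hne => contrib_eq_zero lset m a i hm h1 (by push_cast at h2 ⊢; omega) hne)
  rw [List.map_congr_left hblock]
  have hhit : ∀ a ∈ PySem.List.pyRange 0 ((10 : Nat) : Int) 1,
      contrib lset m (100 * a + ((m / 10 : Nat) : Int))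
        = if dsN m ≤ 9 then PySem.List.pyGetD lset (100 * a + ((m / 10 : Nat) : Int)) 0 else 0 := by
    intro a _
    exact contrib_at_hit lset m a hm (pyGetD_nonneg_total lset _ hnn)
  rw [List.map_congr_left hhit]
  by_cases hds : dsN m ≤ 9
  · simp only [if_pos hds]
    norm_num
  · simp only [if_neg hds]
    exact List.sum_eq_zero (by intro x hx; rcases List.mem_map.mp hx with ⟨a, _, rfl⟩; rfl)

-- B-side readers: indexing a comprehension over range(N)
theorem getD_map_pyRangeI (f : Int → Int) (N : Int) (k : Nat) (h : (k : Int) < N) :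
    ((PySem.List.pyRange 0 N 1).map f).getD k 0 = f k := by
  have hlen : k < ((PySem.List.pyRange 0 N 1).map f).length := by
    rw [List.length_map, PySem.List.length_pyRange_one]; omega
  rw [List.getD_eq_getElem _ _ hlen, List.getElem_map, PySem.List.getElem_pyRange_one]
  simp

theorem length_map_pyRangeI (f : Int → Int) (N : Int) :
    ((PySem.List.pyRange 0 N 1).map f).length = N.toNat := by
  rw [List.length_map, PySem.List.length_pyRange_one]; omega

theorem sum_filter_map (l : List Int) (p : Int → Bool) (f : Int → Int) :
    ((l.filter p).map f).sum = (l.map (fun x => if p x then f x else 0)).sum := by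
  induction l with
  | nil => rfl
  | cons x xs ih => by_cases h : p x <;> simp [h, ih]

-- the 100-state invariant
def GoodG (g : List Int) : Prop := g.length = 100 ∧ ∀ x ∈ g, 0 ≤ x

theorem nonneg_altBase3 : ∀ x ∈ altBase3, 0 ≤ x := by
  intro x hx
  rcases List.mem_map.mp hx with ⟨i, _, rfl⟩
  split <;> norm_num

theorem length_altExpand (g : List Int) : (altExpand g).length = 1000 := by
  rw [altExpand, length_map_pyRangeI]; rfl

theorem nonneg_altExpand (g : List Int) (hg : ∀ x ∈ g, 0 ≤ x) : ∀ x ∈ altExpand g, 0 ≤ x := by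
  intro x hx
  rcases List.mem_map.mp hx with ⟨i, hi, rfl⟩
  split
  · exact pyGetD_nonneg_total g _ hg
  · rfl

theorem good_altInit : GoodG altInit := by
  constructor
  · rw [altInit, length_map_pyRangeI]; rfl
  · intro x hx
    rcases List.mem_map.mp hx with ⟨k, hk, rfl⟩
    rcases PySem.List.mem_pyRange_one.mp hk with ⟨hk0, hk1⟩
    apply List.sum_nonneg
    intro y hy
    rcases List.mem_map.mp hy with ⟨a, ha, rfl⟩
    rcases PySem.List.mem_pyRange_one.mp ha with ⟨ha0, ha1⟩
    exact pyGetD_nonneg_total _ _ nonneg_altBase3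

theorem good_altT (g : List Int) (hg : GoodG g) : GoodG (altT g) := by
  constructor
  · rw [altT, length_map_pyRangeI]; rfl
  · intro x hx
    rcases List.mem_map.mp hx with ⟨k, hk, rfl⟩
    rcases PySem.List.mem_pyRange_one.mp hk with ⟨hk0, hk1⟩
    apply List.sum_nonneg
    intro y hy
    rcases List.mem_map.mp hy with ⟨b, hb, rfl⟩
    have hb' := List.mem_filter.mp hb
    rcases PySem.List.mem_pyRange_one.mp hb'.1 with ⟨hb0, hb1⟩
    exact pyGetD_nonneg_total g _ hg.2

theorem getD_altExpand (g : List Int) (m : Nat) (hm : m < 1000) :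
    (altExpand g).getD m 0 = if dsN m ≤ 9 then g.getD (m / 10) 0 else 0 := by
  rw [altExpand, getD_map_pyRangeI _ 1000 m (by omega), altDS_natCast]
  have e3 : PySem.Int.floordiv ((m : Nat) : Int) 10 = ((m / 10 : Nat) : Int) := by
    exact_mod_cast PySem.Int.floordiv_natCast m 10
  rw [e3, PySem.List.pyGetD_natCast]

theorem getD_altT (g : List Int) (k0 : Nat) (hk : k0 < 100) :
    (altT g).getD k0 0 =
      ((PySem.List.pyRange 0 10 1).map (fun b =>
        if b + ((k0 / 10 : Nat) : Int) + ((k0 % 10 : Nat) : Int) ≤ 9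
        then PySem.List.pyGetD g (10 * b + ((k0 / 10 : Nat) : Int)) 0 else 0)).sum := by
  rw [altT, getD_map_pyRangeI _ 100 k0 (by omega), sum_filter_map]
  have e2 : PySem.Int.mod ((k0 : Nat) : Int) 10 = ((k0 % 10 : Nat) : Int) := by
    exact_mod_cast PySem.Int.mod_natCast k0 10
  have e3 : PySem.Int.floordiv ((k0 : Nat) : Int) 10 = ((k0 / 10 : Nat) : Int) := by
    exact_mod_cast PySem.Int.floordiv_natCast k0 10
  simp only [e2, e3, decide_eq_true_eq]

theorem getD_altInit (k0 : Nat) (hk : k0 < 100) :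
    altInit.getD k0 0 = ((PySem.List.pyRange 0 10 1).map
      (fun a => PySem.List.pyGetD altBase3 (100 * a + ((k0 : Nat) : Int)) 0)).sum := by
  rw [altInit, getD_map_pyRangeI _ 100 k0 (by omega)]

theorem init_eq : tdStep altBase3 = altExpand altInit := by
  apply List.ext_getElem
  · rw [length_tdStep, length_altExpand]
  intro m hm1 hm2
  have hm : m < 1000 := by rw [length_tdStep] at hm1; exact hm1
  rw [← List.getD_eq_getElem _ 0 hm1, ← List.getD_eq_getElem _ 0 hm2,
    tdStep_master altBase3 nonneg_altBase3 m hm,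
    getD_altExpand altInit m hm, getD_altInit (m / 10) (by omega)]

theorem step_eq (g : List Int) (hg : GoodG g) : tdStep (altExpand g) = altExpand (altT g) := by
  apply List.ext_getElem
  · rw [length_tdStep, length_altExpand]
  intro m hm1 hm2
  have hm : m < 1000 := by rw [length_tdStep] at hm1; exact hm1
  rw [← List.getD_eq_getElem _ 0 hm1, ← List.getD_eq_getElem _ 0 hm2,
    tdStep_master (altExpand g) (nonneg_altExpand g hg.2) m hm,
    getD_altExpand (altT g) m hm, getD_altT g (m / 10) (by omega)]
  by_cases hds : dsN m ≤ 9
  · rw [if_pos hds, if_pos hds]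
    apply congrArg List.sum
    apply List.map_congr_left
    intro a ha
    rcases PySem.List.mem_pyRange_one.mp ha with ⟨ha0, ha1⟩
    rw [altExpand, PySem.List.pyGetD_map_pyRange_of_nonneg _ _ _ _ (by omega) (by push_cast; omega)]
    have eA : altDS (100 * a + ((m / 10 : Nat) : Int))
        = a + ((m / 10 / 10 : Nat) : Int) + ((m / 10 % 10 : Nat) : Int) := by
      simp only [altDS, PySem.Int.floordiv_eq_ediv_of_pos (show (0:Int) < 100 by norm_num),
        PySem.Int.floordiv_eq_ediv_of_pos (show (0:Int) < 10 by norm_num),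
        PySem.Int.mod_eq_emod_of_pos (show (0:Int) < 10 by norm_num)]
      omega
    have eB : PySem.Int.floordiv (100 * a + ((m / 10 : Nat) : Int)) 10
        = 10 * a + ((m / 10 / 10 : Nat) : Int) := by
      rw [PySem.Int.floordiv_eq_ediv_of_pos (show (0:Int) < 10 by norm_num)]
      omega
    rw [eA, eB]
  · rw [if_neg hds, if_neg hds]

set_option maxRecDepth 1000000 in
theorem base3_eq' : tdBase3 = altBase3 := by decide

theorem foldl_const_iterate {alpha : Type} (f : List Int → List Int) :
    ∀ (l : List alpha) (g : List Int), l.foldl (fun g _ => f g) g = f^[l.length] g := by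
  intro l
  induction l with
  | nil => intro g; rfl
  | cons x xs ih =>
    intro g
    rw [List.foldl_cons, ih, List.length_cons, Function.iterate_succ_apply]

theorem good_iter : ∀ n : Nat, GoodG (altT^[n] altInit)
  | 0 => good_altInit
  | n + 1 => by rw [Function.iterate_succ_apply']; exact good_altT _ (good_iter n)

theorem tdset_eq_four (n : Nat) : tdset ((n : Int) + 4) = altExpand (altT^[n] altInit) := by
  induction n with
  | zero =>
    rw [show ((0 : Nat) : Int) + 4 = 4 by norm_num, tdset]
    norm_num
    rw [tdset]
    norm_num
    rw [base3_eq']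
    exact init_eq
  | succ n ih =>
    rw [show ((n + 1 : Nat) : Int) + 4 = ((n : Int) + 4) + 1 by push_cast; ring, tdset]
    rw [if_neg (by omega), if_neg (by omega), if_neg (by omega), if_neg (by omega)]
    rw [show (n : Int) + 4 + 1 - 1 = (n : Int) + 4 by ring, ih,
      step_eq _ (good_iter n), Function.iterate_succ_apply']

set_option maxRecDepth 100000 in
theorem base1_eq' : tdBase1 = altBase1 := by decide

set_option maxRecDepth 1000000 in
theorem base2_eq' : tdBase2 = altBase2 := by decide

-- ===== VERDICT (by name: the statement is the Claim_ definition above) =====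
theorem tdset_spec : Claim_equal_tdset := by
  intro d _ hpre
  unfold Spec_tdset
  rcases hpre with ⟨h1, h2⟩
  by_cases hd1 : d = 1
  · subst hd1
    rw [show tdset 1 = tdBase1 by rw [tdset]; norm_num,
      show tdset_alt 1 = altBase1 by rw [tdset_alt]; norm_num]
    exact base1_eq'
  by_cases hd2 : d = 2
  · subst hd2
    rw [show tdset 2 = tdBase2 by rw [tdset]; norm_num,
      show tdset_alt 2 = altBase2 by rw [tdset_alt]; norm_num]
    exact base2_eq'
  by_cases hd3 : d = 3
  · subst hd3
    rw [show tdset 3 = tdBase3 by rw [tdset]; norm_num,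
      show tdset_alt 3 = altBase3 by rw [tdset_alt]; norm_num]
    exact base3_eq'
  · obtain ⟨n, rfl⟩ : ∃ n : Nat, d = (n : Int) + 4 := ⟨(d - 4).toNat, by omega⟩
    rw [tdset_eq_four n, tdset_alt]
    rw [if_neg (by omega), if_neg (by omega), if_neg (by omega),
      show (n : Int) + 4 - 4 = (n : Int) by ring,
      foldl_const_iterate altT (PySem.List.pyRange 0 (n : Int) 1) altInit,
      PySem.List.length_pyRange_one]
    norm_num
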